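-- pv_equiv track=rewrite | github.com/shinde2/UVA | 10037/10037.py | two_slowest
-- ===== SOURCE A (Python) =====
-- def two_slowest(start):
--
--     s0 = None
--     s1 = None
--
--     for time, typ in start[::-1]:
--         if typ == "A":
--             if not s0:
--                 s0 = (time, typ)
--             elif not s1:
--                 s1 = (time, typ)
--             else:
--                 return s0, s1
--
--     return s0, s1
-- ===== SOURCE B (Python) =====
-- def two_slowest(start):
--     a = [(t, typ) for t, typ in start if typ == "A"]
--     if len(a) >= 2:
--         return a[-1], a[-2]
--     if a:
--         return a[-1], None
--     return None, None
-- ===== Notes on version B (the rewrite author's own statement) =====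
-- stated objective: simpler
-- what changed: Replaces the reversed scan with two mutable slots and an early return by materialize-then-index: one forward filter collects all type-A entries, then the last and second-to-last are taken by negative indexing.
import Mathlib
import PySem

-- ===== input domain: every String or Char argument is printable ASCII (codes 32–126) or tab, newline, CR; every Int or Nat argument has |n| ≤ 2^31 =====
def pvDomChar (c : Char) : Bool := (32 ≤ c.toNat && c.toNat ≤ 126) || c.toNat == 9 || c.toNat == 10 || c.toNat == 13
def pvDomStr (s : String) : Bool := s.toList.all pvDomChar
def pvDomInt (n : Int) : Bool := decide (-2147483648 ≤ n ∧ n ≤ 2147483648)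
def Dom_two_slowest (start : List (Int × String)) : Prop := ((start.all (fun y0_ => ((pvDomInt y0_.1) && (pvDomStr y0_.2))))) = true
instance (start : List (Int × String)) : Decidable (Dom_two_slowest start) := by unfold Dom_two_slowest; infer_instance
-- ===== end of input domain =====

-- B replaces A's two-slot reverse scan with early return by a forward filter of all
-- type-A entries followed by negative indexing from the end (objective: simpler).

-- ===== PORT A =====
-- the for-loop over start[::-1] with slots s0, s1 and the early 'return s0, s1'
def twoSlowestLoop : List (Int × String) → Option (Int × String) → Option (Int × String) →
    (Option (Int × String)) × (Option (Int × String))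
  | [], s0, s1 => (s0, s1)
  | (time, typ) :: rest, s0, s1 =>
    if typ = "A" then
      match s0 with
      | none => twoSlowestLoop rest (some (time, typ)) s1
      | some _ =>
        match s1 with
        | none => twoSlowestLoop rest s0 (some (time, typ))
        | some _ => (s0, s1)          -- early return
    else twoSlowestLoop rest s0 s1

def two_slowest (start : List (Int × String)) : (Option (Int × String)) × (Option (Int × String)) :=
  twoSlowestLoop ((PySem.List.slice? start none none (-1)).getD []) none none

-- ===== PORT B =====
def two_slowest_alt (start : List (Int × String)) : (Option (Int × String)) × (Option (Int × String)) :=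
  let a := start.filter (fun p => p.2 = "A")
  if a.length ≥ 2 then (PySem.List.pyGet? a (-1), PySem.List.pyGet? a (-2))
  else if a ≠ [] then (PySem.List.pyGet? a (-1), none)
  else (none, none)

-- ===== PRECONDITION & SPEC =====
def Spec_two_slowest (start : List (Int × String)) (out : (Option (Int × String)) × (Option (Int × String))) : Prop := out = two_slowest_alt start
instance (start : List (Int × String)) (out : (Option (Int × String)) × (Option (Int × String))) : Decidable (Spec_two_slowest start out) := by unfold Spec_two_slowest; infer_instance

-- ===== CLAIM (what is proved, stated in full; the proofs are below) =====
def Claim_equal_two_slowest : Prop := ∀ (start : List (Int × String)), Dom_two_slowest start → Spec_two_slowest start (two_slowest start)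

-- ===== LEMMAS AND PROOFS =====

-- once both slots are filled the loop's answer is fixed
theorem twoSlowestLoop_full (l : List (Int × String)) (a b : Int × String) :
    twoSlowestLoop l (some a) (some b) = (some a, some b) := by
  induction l with
  | nil => rfl
  | cons x rest ih =>
    obtain ⟨t, ty⟩ := x
    by_cases h : ty = "A" <;> simp [twoSlowestLoop, h, ih]

-- with the first slot filled, the second slot becomes the first A of the remaining list
theorem twoSlowestLoop_one (l : List (Int × String)) (a : Int × String) :
    twoSlowestLoop l (some a) none = (some a, (l.filter (fun p => p.2 = "A")).head?) := by
  induction l with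
  | nil => rfl
  | cons x rest ih =>
    obtain ⟨t, ty⟩ := x
    by_cases h : ty = "A"
    · simp [twoSlowestLoop, h, twoSlowestLoop_full]
    · simp [twoSlowestLoop, h, ih]

-- the loop from empty slots returns the first two A-entries of its input
theorem twoSlowestLoop_none (l : List (Int × String)) :
    twoSlowestLoop l none none =
      ((l.filter (fun p => p.2 = "A")).head?, (l.filter (fun p => p.2 = "A")).tail.head?) := by
  induction l with
  | nil => rfl
  | cons x rest ih =>
    obtain ⟨t, ty⟩ := x
    by_cases h : ty = "A"
    · simp [twoSlowestLoop, h, twoSlowestLoop_one]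
    · simp [twoSlowestLoop, h, ih]

-- ===== VERDICT (by name: the statement is the Claim_ definition above) =====
theorem two_slowest_spec : Claim_equal_two_slowest := by
  intro start _
  unfold Spec_two_slowest two_slowest two_slowest_alt
  rw [PySem.List.slice?_none_none_neg_one]
  simp only [Option.getD_some, twoSlowestLoop_none]
  rw [List.filter_reverse]
  generalize start.filter (fun p => decide (p.2 = "A")) = a
  match a with
  | [] => rfl
  | [x] => simp [PySem.List.pyGet?_neg_one]
  | x :: y :: rest =>
    have h2 : (x :: y :: rest).length ≥ 2 := by simp
    rw [PySem.List.pyGet?_neg_ofNat _ 2 (by omega) h2]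
    have h1 : (1 : Nat) < (x :: y :: rest).length := by simp
    have htail : (x :: y :: rest).reverse.tail.head? = (x :: y :: rest).reverse[1]? := by
      cases hrev : (x :: y :: rest).reverse with
      | nil => simp at hrev
      | cons z zs => simp [List.head?_eq_getElem?]
    simp only [ge_iff_le, h2, if_pos, PySem.List.pyGet?_neg_one, htail,
      List.getElem?_reverse h1, ← List.head?_reverse]
    simp
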